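-- pv_equiv track=rewrite | github.com/ayhem18/Towards_SE | ProblemSolving/Python/NeetCodeRoadMap/1-dDP.py | all_palindromes_start
-- ===== SOURCE A (Python) =====
-- def all_palindromes_start(string: str) -> set[str]:
--     """
--         This function returns all palindrome substring that start from the beginning of the string.
--     """
--     if len(string) == 1:
--         return {string}
--
--     pals = set([string[0], string[:2]] if string[0] == string[1] else [string[0]])
--     if len(string) == 2:
--         return set(pals)
--
--     # at this point of the code len(string) >= 3
--     p1, p2 = 0, 1
--     last_len_pal = 1 if string[0] == string[1] else 0
--     set_chars = set(string[:2])
--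
--     for i, char in enumerate(string[2:], start=2):
--         if i % 2 == 0:
--             p2 += 1
--
--         if i % 2 == 1:
--             p1 += 1
--
--         set_chars.add(char)
--         if last_len_pal == i - 1:
--             # this means the last detected palindrome was the previous substring
--             # then this new substring is a palindrome only and only if all characters so far are the same
--             if len(set_chars) == 1:
--                 last_len_pal += 1
--                 pals.add(string[:i + 1])
--             # no need to proceed to the next part
--             continue
--
--         tp1, tp2 = p1, p2
--         # time to evaluate w
--         while tp1 > -1 and tp2 <= i and string[tp1] == string[tp2]:
--             tp1 -= 1
--             tp2 += 1
--
--         # at this point there 2 cases: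
--         # either p1 == -1 and p2 == len(string) which means the string is palindrome
--         if tp1 == -1 and tp2 == i + 1:
--             last_len_pal = i
--             pals.add(string[: i + 1])
--
--     return pals
-- ===== SOURCE B (Python) =====
-- def all_palindromes_start(string: str) -> set[str]:
--     return {string[:i] for i in range(1, len(string) + 1) if string[:i] == string[:i][::-1]}
-- ===== Notes on version B (the rewrite author's own statement) =====
-- stated objective: simpler
-- what changed: A's stateful incremental scan (center pointers p1/p2, last-palindrome index, distinct-character set shortcut) is replaced by a one-line set comprehension that tests each prefix directly against its reversal.
import Mathlib
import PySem

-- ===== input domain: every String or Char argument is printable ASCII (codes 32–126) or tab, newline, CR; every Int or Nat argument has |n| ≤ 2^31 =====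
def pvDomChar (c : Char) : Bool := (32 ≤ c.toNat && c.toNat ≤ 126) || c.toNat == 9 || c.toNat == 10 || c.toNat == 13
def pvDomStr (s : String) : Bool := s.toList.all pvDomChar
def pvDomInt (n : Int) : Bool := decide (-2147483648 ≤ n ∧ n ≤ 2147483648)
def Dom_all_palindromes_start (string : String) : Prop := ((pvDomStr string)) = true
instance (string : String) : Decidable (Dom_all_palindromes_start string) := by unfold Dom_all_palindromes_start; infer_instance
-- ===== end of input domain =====

-- B replaces A's stateful center-expansion scan (pointer pair, last-palindrome index, distinct-char set)
-- by a one-line comprehension testing each prefix against its reversal; objective: simpler, same O(n^2) cost.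

-- ===== PORT A =====
-- the inner 'while tp1 > -1 and tp2 <= i and string[tp1] == string[tp2]' loop of A
def apsWhile (s : List Char) (i tp1 tp2 : Int) : Int × Int :=
  if h : -1 < tp1 ∧ tp2 ≤ i ∧ (PySem.List.pyGet? s tp1).isSome
        ∧ PySem.List.pyGet? s tp1 = PySem.List.pyGet? s tp2 then
    apsWhile s i (tp1 - 1) (tp2 + 1)
  else (tp1, tp2)
termination_by (tp1 + 1).toNat
decreasing_by omega

-- the body of A's 'for i, char in enumerate(string[2:], start=2)' loop
def apsStep (s : List Char) (st : Int × Int × Int × PySem.Set Char × PySem.Set String)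
    (ic : Int × Char) : Int × Int × Int × PySem.Set Char × PySem.Set String :=
  let i := ic.1
  let p2 := if PySem.Int.mod i 2 = 0 then st.2.1 + 1 else st.2.1
  let p1 := if PySem.Int.mod i 2 = 1 then st.1 + 1 else st.1
  let last := st.2.2.1
  let sc := PySem.Set.add st.2.2.2.1 ic.2
  let pals := st.2.2.2.2
  if last = i - 1 then
    if PySem.Set.len sc = 1 then
      (p1, p2, last + 1, sc, PySem.Set.add pals (String.ofList (PySem.List.slice s none (some (i + 1)))))
    else (p1, p2, last, sc, pals)
  else
    let tp := apsWhile s i p1 p2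
    if tp.1 = -1 ∧ tp.2 = i + 1 then
      (p1, p2, i, sc, PySem.Set.add pals (String.ofList (PySem.List.slice s none (some (i + 1)))))
    else (p1, p2, last, sc, pals)

def all_palindromes_start (string : String) : List String :=
  let s := string.toList
  if s.length = 1 then PySem.Set.ofList [string]
  else
    match s with
    | [] => []  -- Python raises IndexError on string[0] here; excluded by Pre_
    | [_] => []  -- unreachable: length-1 strings are returned above
    | c0 :: c1 :: _ =>
      let pals : PySem.Set String :=
        PySem.Set.ofList (if c0 = c1 then [String.ofList [c0], String.ofList [c0, c1]]
                          else [String.ofList [c0]])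
      if s.length = 2 then PySem.Set.ofList pals
      else
        let lastInit : Int := if c0 = c1 then 1 else 0
        let scInit : PySem.Set Char := PySem.Set.ofList (PySem.List.slice s none (some 2))
        let fin := (PySem.List.enumerate (PySem.List.slice s (some 2) none) 2).foldl
          (apsStep s) (0, 1, lastInit, scInit, pals)
        fin.2.2.2.2

-- ===== PORT B =====
def all_palindromes_start_alt (string : String) : List String :=
  let s := string.toList
  PySem.Set.ofList
    (((PySem.List.pyRange 1 ((s.length : Int) + 1) 1).filter
        (fun i => PySem.List.slice? (PySem.List.slice s none (some i)) none none (-1)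
                    == some (PySem.List.slice s none (some i)))).map
      (fun i => String.ofList (PySem.List.slice s none (some i))))

-- ===== PRECONDITION & SPEC =====
-- Pre_ excludes only the empty string, on which A raises IndexError at string[0].
def Pre_all_palindromes_start (string : String) : Prop := string ≠ ""
instance (string : String) : Decidable (Pre_all_palindromes_start string) := by
  unfold Pre_all_palindromes_start; infer_instance
def pvWitness_all_palindromes_start : String := "aba"

def Spec_all_palindromes_start (string : String) (out : List String) : Prop :=
  out = all_palindromes_start_alt string
instance (string : String) (out : List String) : Decidable (Spec_all_palindromes_start string out) := by
  unfold Spec_all_palindromes_start; infer_instance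

-- ===== CLAIM (what is proved, stated in full; the proofs are below) =====
def Claim_equal_all_palindromes_start : Prop := ∀ (string : String),
  Dom_all_palindromes_start string → Pre_all_palindromes_start string →
  Spec_all_palindromes_start string (all_palindromes_start string)

-- ===== LEMMAS AND PROOFS =====

-- the palindromic prefixes of s of length 1..m, shortest first
def palPrefs (s : List Char) (m : Nat) : List String :=
  ((List.range m).filter (fun k => decide (s.take (k + 1) = (s.take (k + 1)).reverse))).map
    (fun k => String.ofList (s.take (k + 1)))

theorem palPrefs_zero (s : List Char) : palPrefs s 0 = [] := rfl

theorem palPrefs_succ (s : List Char) (m : Nat) :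
    palPrefs s (m + 1) = palPrefs s m ++
      (if s.take (m + 1) = (s.take (m + 1)).reverse then [String.ofList (s.take (m + 1))] else []) := by
  unfold palPrefs
  rw [List.range_succ, List.filter_append, List.map_append]
  congr 1
  simp only [List.filter_cons, List.filter_nil, decide_eq_true_eq]
  split_ifs with h <;> simp

theorem mem_palPrefs (s : List Char) (m : Nat) (x : String) (hx : x ∈ palPrefs s m) :
    ∃ k, k < m ∧ x = String.ofList (s.take (k + 1)) := by
  simp only [palPrefs, List.mem_map, List.mem_filter, List.mem_range] at hx
  obtain ⟨k, ⟨hk, -⟩, rfl⟩ := hx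
  exact ⟨k, hk, rfl⟩

theorem take_fresh_not_mem (s : List Char) (m : Nat) (hm : m < s.length) :
    String.ofList (s.take (m + 1)) ∉ palPrefs s m := by
  intro h
  obtain ⟨k, hk, he⟩ := mem_palPrefs s m _ h
  have := String.ofList_inj.mp he
  have h1 : (s.take (m + 1)).length = m + 1 := by simp; omega
  have h2 : (s.take (k + 1)).length = k + 1 := by simp; omega
  rw [this] at h1; omega

theorem palPrefs_nodup (s : List Char) (m : Nat) (hm : m ≤ s.length) : (palPrefs s m).Nodup := by
  induction m with
  | zero => simp [palPrefs_zero]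
  | succ k ih =>
    rw [palPrefs_succ]
    rcases Nat.lt_or_ge k s.length with h | h
    · refine List.Nodup.append (ih (by omega)) ?_ ?_
      · split_ifs <;> simp
      · intro x hx hx2
        split_ifs at hx2 <;> simp at hx2
        subst hx2; exact take_fresh_not_mem s k h hx
    · omega

-- pyGet? at an in-range natural index
theorem pyGet?_nat (s : List Char) (k : Nat) (h : k < s.length) :
    PySem.List.pyGet? s (k : Int) = some s[k] := by
  simp [PySem.List.pyGet?_natCast, List.getElem?_eq_getElem h]

-- palindrome of the (i+1)-prefix ⇔ the mirrored pairs agree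
theorem pal_take_iff (s : List Char) (i : Nat) (hi : i < s.length) :
    s.take (i + 1) = (s.take (i + 1)).reverse ↔ ∀ k : Nat, k ≤ i → s[k]? = s[i - k]? := by
  have hlen : (s.take (i + 1)).length = i + 1 := by rw [List.length_take]; omega
  constructor
  · intro hp k hk
    have := congrArg (fun l => l[k]?) hp
    simp only at this
    rw [List.getElem?_reverse (by omega), hlen, List.getElem?_take, List.getElem?_take] at this
    rw [if_pos (by omega), if_pos (by omega), show i + 1 - 1 - k = i - k by omega] at this
    exact this
  · intro hp
    apply List.ext_getElem?
    intro k
    rcases Nat.lt_or_ge k (i + 1) with hk | hk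
    · rw [List.getElem?_reverse (by omega), hlen, List.getElem?_take, List.getElem?_take]
      rw [if_pos (by omega), if_pos (by omega), show i + 1 - 1 - k = i - k by omega]
      exact hp k (by omega)
    · rw [List.getElem?_eq_none (by omega), List.getElem?_eq_none (by simp; omega)]

-- mirrored pairs up to the half-way point suffice
theorem pairs_half (s : List Char) (i : Nat) (_ : i < s.length)
    (h : ∀ k : Nat, k ≤ (i - 1) / 2 → s[k]? = s[i - k]?) :
    ∀ k : Nat, k ≤ i → s[k]? = s[i - k]? := by
  intro k hk
  rcases Nat.lt_or_ge ((i - 1) / 2) k with hgt | hle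
  · rcases Nat.lt_or_ge i (2 * k) with h2 | h2
    · have hk' : i - k ≤ (i - 1) / 2 := by omega
      have := h (i - k) hk'
      have e : i - (i - k) = k := by omega
      rw [e] at this; exact this.symm
    · have : i = 2 * k := by omega
      have e : i - k = k := by omega
      rw [e]
  · exact h k hle

-- the while loop returns (-1, i+1) iff every pair down from t1 matches
theorem apsWhile_spec (s : List Char) (i : Nat) (hi : i < s.length) :
    ∀ (m : Nat) (t1 t2 : Int), t1 = (m : Int) - 1 → t1 + t2 = (i : Int) → t1 ≤ (i : Int) →
      (apsWhile s (i : Int) t1 t2 = (-1, (i : Int) + 1) ↔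
        ∀ k : Nat, (k : Int) ≤ t1 → s[k]? = s[i - k]?) := by
  intro m
  induction m with
  | zero =>
    intro t1 t2 h1 h2 h3
    have ht1 : t1 = -1 := by omega
    have ht2 : t2 = (i : Int) + 1 := by omega
    subst ht1; subst ht2
    rw [apsWhile, dif_neg (by omega)]
    constructor
    · intro _ k hk; exact absurd hk (by omega)
    · intro _; rfl
  | succ p ih =>
    intro t1 t2 h1 h2 h3
    have ht1 : t1 = (p : Int) := by push_cast at h1; omega
    subst ht1
    have ht2 : t2 = (i : Int) - (p : Int) := by omega
    subst ht2
    have hp : p ≤ i := by omega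
    have hip : i - p < s.length := by omega
    have e1 : PySem.List.pyGet? s ((p : Nat) : Int) = some (s[p]'(by omega)) :=
      pyGet?_nat s p (by omega)
    have e2 : PySem.List.pyGet? s ((i : Int) - (p : Int)) = some (s[i - p]'hip) := by
      rw [show (i : Int) - (p : Int) = ((i - p : Nat) : Int) by omega]
      exact pyGet?_nat s (i - p) hip
    rw [apsWhile]
    by_cases hEq : s[p]'(by omega) = s[i - p]'hip
    · rw [dif_pos (by exact ⟨by omega, by omega, by rw [e1]; rfl,
          by rw [e1, e2]; exact congrArg some hEq⟩)]
      rw [ih ((p : Int) - 1) ((i : Int) - (p : Int) + 1) rfl (by ring) (by omega)]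
      constructor
      · intro hall k hk
        rcases Nat.lt_or_ge k p with hlt | hge
        · exact hall k (by omega)
        · have hkp : k = p := by omega
          subst hkp
          rw [List.getElem?_eq_getElem (by omega), List.getElem?_eq_getElem (by omega)]
          exact congrArg some hEq
      · intro hall k hk; exact hall k (by omega)
    · rw [dif_neg]
      · constructor
        · intro hcon; exfalso
          have hfst := congrArg Prod.fst hcon
          simp only at hfst; omega
        · intro hall; exfalso
          have := hall p (by omega)
          rw [List.getElem?_eq_getElem (by omega), List.getElem?_eq_getElem (by omega)] at this
          exact hEq (Option.some_inj.mp this)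
      · intro hcon
        obtain ⟨-, -, -, h4⟩ := hcon
        rw [e1, e2] at h4
        exact hEq (Option.some_inj.mp h4)

-- a set built from a nonempty list has one element iff all elements are equal
theorem setLen_one_iff (c : Char) (l : List Char) :
    PySem.Set.len (PySem.Set.ofList (c :: l)) = 1 ↔ ∀ x ∈ c :: l, x = c := by
  rw [PySem.Set.ofList_cons]
  constructor
  · intro h x hx
    have hlen : (PySem.Set.discard (PySem.Set.ofList l) c).length = 0 := by
      simp only [PySem.Set.len] at h
      simp at h ⊢; omega
    have hnil := List.eq_nil_of_length_eq_zero hlen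
    rcases List.mem_cons.mp hx with rfl | hx'
    · rfl
    · by_contra hne
      have : x ∈ PySem.Set.discard (PySem.Set.ofList l) c := by
        rw [PySem.Set.mem_discard _ _ _]
        exact ⟨(PySem.Set.mem_ofList _ _).mpr hx', hne⟩
      rw [hnil] at this; simp at this
  · intro h
    have : PySem.Set.discard (PySem.Set.ofList l) c = [] := by
      apply List.eq_nil_iff_forall_not_mem.mpr
      intro x hx
      rw [PySem.Set.mem_discard, PySem.Set.mem_ofList] at hx
      exact hx.2 (h x (List.mem_cons_of_mem c hx.1))
    simp [PySem.Set.len, this]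

-- all-equal characterisation of the prefix via indexed reads
theorem allEq_take_iff (s : List Char) (m : Nat) (hm : m ≤ s.length) (c : Char) :
    (∀ x ∈ s.take m, x = c) ↔ ∀ j : Nat, j < m → s[j]? = some c := by
  constructor
  · intro h j hj
    have hjs : j < s.length := by omega
    rw [List.getElem?_eq_getElem hjs]
    refine congrArg some (h s[j] ?_)
    rw [List.mem_take_iff_getElem]
    exact ⟨j, by simp; omega, rfl⟩
  · intro h x hx
    rw [List.mem_take_iff_getElem] at hx
    obtain ⟨j, hj, rfl⟩ := hx
    have hjm : j < m := by simp at hj; omega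
    have := h j hjm
    rw [List.getElem?_eq_getElem (by omega)] at this
    exact Option.some_inj.mp this

-- a constant prefix is a palindrome
theorem pal_of_allEq (s : List Char) (m : Nat) (c : Char) (h : ∀ x ∈ s.take m, x = c) :
    s.take m = (s.take m).reverse := by
  have : s.take m = List.replicate (s.take m).length c := List.eq_replicate_of_mem h
  rw [this, List.reverse_replicate]

-- two consecutive palindromic prefixes force a constant prefix
theorem allEq_of_consec_pal (s : List Char) (i : Nat) (hi : i < s.length) (hi2 : 1 ≤ i)
    (h1 : s.take i = (s.take i).reverse) (h2 : s.take (i + 1) = (s.take (i + 1)).reverse) :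
    ∀ x ∈ s.take (i + 1), x = s[0]'(by omega) := by
  have hp1 : ∀ k : Nat, k ≤ i - 1 → s[k]? = s[i - 1 - k]? := by
    have := (pal_take_iff s (i - 1) (by omega)).mp (by rw [show i - 1 + 1 = i by omega]; exact h1)
    intro k hk; have := this k hk; rwa [show i - 1 - k = i - 1 - k by rfl] at this
  have hp2 : ∀ k : Nat, k ≤ i → s[k]? = s[i - k]? := (pal_take_iff s i hi).mp h2
  have hstep : ∀ j : Nat, j < i → s[j]? = s[j + 1]? := by
    intro j hj
    have a1 : s[j]? = s[i - 1 - j]? := hp1 j (by omega)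
    have a2 : s[j + 1]? = s[i - (j + 1)]? := hp2 (j + 1) (by omega)
    rw [show i - (j + 1) = i - 1 - j by omega] at a2
    rw [a1, a2]
  have hconst : ∀ j : Nat, j ≤ i → s[j]? = s[0]? := by
    intro j
    induction j with
    | zero => intro _; rfl
    | succ p ih =>
      intro hp
      rw [← hstep p (by omega)]
      exact ih (by omega)
  rw [allEq_take_iff s (i + 1) (by omega)]
  intro j hj
  rw [hconst j (by omega), List.getElem?_eq_getElem (by omega)]

-- sc invariant step: adding s[i] to the set of the first i characters
theorem set_take_step (s : List Char) (i : Nat) (hi : i < s.length) :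
    PySem.Set.add (PySem.Set.ofList (s.take i)) (s[i]'hi) = PySem.Set.ofList (s.take (i + 1)) := by
  rw [← PySem.Set.ofList_append_singleton, ← List.take_concat_get' s i hi]

-- the palindromic prefixes of length at most 2
theorem palPrefs_two (c0 c1 : Char) (r : List Char) :
    palPrefs (c0 :: c1 :: r) 2 =
      if c0 = c1 then [String.ofList [c0], String.ofList [c0, c1]] else [String.ofList [c0]] := by
  rw [show (2:Nat) = 1 + 1 from rfl, palPrefs_succ, show (1:Nat) = 0 + 1 from rfl,
      palPrefs_succ, palPrefs_zero]
  simp only [List.take_succ_cons, List.take_zero, List.nil_append, List.reverse_cons,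
    List.reverse_nil, List.singleton_append]
  rw [if_pos trivial]
  by_cases hcc : c0 = c1
  · subst hcc
    rw [if_pos rfl, if_pos rfl]
    rfl
  · rw [if_neg (by simp [hcc]), if_neg hcc]
    simp

-- the loop invariant: state before processing index i
def LoopInv (s : List Char) (i : Nat) (st : Int × Int × Int × PySem.Set Char × PySem.Set String) : Prop :=
  st.1 = (((i - 2) / 2 : Nat) : Int) ∧
  st.2.1 = (((i + 1) / 2 : Nat) : Int) ∧
  (∃ j : Nat, st.2.2.1 = (j : Int) ∧ j < i ∧ s.take (j + 1) = (s.take (j + 1)).reverse ∧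
    ∀ k : Nat, j < k → k < i → ¬ (s.take (k + 1) = (s.take (k + 1)).reverse)) ∧
  st.2.2.2.1 = PySem.Set.ofList (s.take i) ∧
  st.2.2.2.2 = palPrefs s i

theorem inv_step (s : List Char) (i : Nat) (st : Int × Int × Int × PySem.Set Char × PySem.Set String)
    (h2 : 2 ≤ i) (hi : i < s.length) (hinv : LoopInv s i st) :
    LoopInv s (i + 1) (apsStep s st ((i : Int), s[i]'hi)) := by
  obtain ⟨hp1, hp2, ⟨j, hj, hjlt, hjpal, hjmax⟩, hsc, hpals⟩ := hinv
  obtain ⟨c, t, rfl⟩ : ∃ c t, s = c :: t := by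
    cases s with
    | nil => simp at hi
    | cons c t => exact ⟨c, t, rfl⟩
  have hmod : PySem.Int.mod (i:Int) 2 = (i:Int) % 2 := PySem.Int.mod_eq_emod_of_pos (by omega)
  have hp1' : (if PySem.Int.mod (i:Int) 2 = 1 then st.1 + 1 else st.1)
      = (((i + 1 - 2) / 2 : Nat) : Int) := by
    rw [hmod, hp1]; split_ifs with hpar <;> omega
  have hp2' : (if PySem.Int.mod (i:Int) 2 = 0 then st.2.1 + 1 else st.2.1)
      = (((i + 1 + 1) / 2 : Nat) : Int) := by
    rw [hmod, hp2]; split_ifs with hpar <;> omega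
  have hscadd : PySem.Set.add st.2.2.2.1 ((c :: t)[i]'hi) = PySem.Set.ofList ((c :: t).take (i+1)) := by
    rw [hsc]; exact set_take_step _ i hi
  have hslice : PySem.List.slice (c :: t) none (some ((i:Int) + 1)) = (c :: t).take (i+1) := by
    rw [show (i:Int) + 1 = ((i+1 : Nat) : Int) by push_cast; ring, PySem.List.slice_to_natCast]
  have htake : (c :: t).take (i+1) = c :: t.take i := List.take_succ_cons
  have hfresh : ∀ (hp : (c :: t).take (i+1) = ((c :: t).take (i+1)).reverse),
      PySem.Set.add (palPrefs (c :: t) i) (String.ofList ((c :: t).take (i+1)))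
        = palPrefs (c :: t) (i+1) := by
    intro hp
    rw [PySem.Set.add_of_not_mem (take_fresh_not_mem _ _ hi), palPrefs_succ, if_pos hp]
  have hkeep : ∀ (hp : ¬ ((c :: t).take (i+1) = ((c :: t).take (i+1)).reverse)),
      palPrefs (c :: t) (i+1) = palPrefs (c :: t) i := by
    intro hp
    rw [palPrefs_succ, if_neg hp, List.append_nil]
  unfold apsStep
  dsimp only
  rw [hj, hp1', hp2', hscadd, hslice, hpals]
  by_cases hji : j = i - 1
  · rw [if_pos (by omega)]
    have hpali : (c :: t).take i = ((c :: t).take i).reverse := by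
      have := hjpal; rwa [hji, show i - 1 + 1 = i by omega] at this
    by_cases hall : ∀ x ∈ c :: t.take i, x = c
    · have hallT : ∀ x ∈ (c :: t).take (i+1), x = c := by rw [htake]; exact hall
      have hlen1 : PySem.Set.len (PySem.Set.ofList ((c :: t).take (i+1))) = 1 := by
        rw [htake]; exact (setLen_one_iff c (t.take i)).mpr hall
      rw [if_pos hlen1]
      have hpal1 : (c :: t).take (i+1) = ((c :: t).take (i+1)).reverse :=
        pal_of_allEq _ _ c hallT
      refine ⟨rfl, rfl, ⟨i, by show (j:Int) + 1 = (i:Int); omega, by omega, hpal1, ?_⟩, rfl, hfresh hpal1⟩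
      intro k hk1 hk2; omega
    · have hlen1 : ¬ (PySem.Set.len (PySem.Set.ofList ((c :: t).take (i+1))) = 1) := by
        rw [htake]; intro hc; exact hall ((setLen_one_iff c (t.take i)).mp hc)
      rw [if_neg hlen1]
      have hnp : ¬ ((c :: t).take (i+1) = ((c :: t).take (i+1)).reverse) := by
        intro hp
        refine hall ?_
        rw [← htake]
        have := allEq_of_consec_pal (c :: t) i hi (by omega) hpali hp
        simpa using this
      refine ⟨rfl, rfl, ⟨j, rfl, by omega, hjpal, ?_⟩, rfl, (hkeep hnp).symm⟩
      intro k hk1 hk2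
      rcases Nat.lt_or_ge k i with hki | hki
      · exact hjmax k hk1 hki
      · have : k = i := by omega
        subst this; exact hnp
  · rw [if_neg (by omega)]
    have hji' : j < i - 1 := by omega
    have hnpi : ¬ ((c :: t).take i = ((c :: t).take i).reverse) := by
      have := hjmax (i - 1) (by omega) (by omega)
      rwa [show i - 1 + 1 = i by omega] at this
    have hiff : apsWhile (c :: t) (i:Int) (((i + 1 - 2) / 2 : Nat) : Int) (((i + 1 + 1) / 2 : Nat) : Int)
        = (-1, (i:Int) + 1) ↔ (c :: t).take (i+1) = ((c :: t).take (i+1)).reverse := by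
      rw [apsWhile_spec (c :: t) i hi ((i + 1 - 2) / 2 + 1) _ _ (by push_cast; ring) (by omega) (by omega)]
      rw [pal_take_iff (c :: t) i hi]
      constructor
      · intro hp
        refine pairs_half (c :: t) i hi ?_
        intro k hk
        exact hp k (by omega)
      · intro hp k hk
        exact hp k (by omega)
    by_cases hpal : (c :: t).take (i+1) = ((c :: t).take (i+1)).reverse
    · rw [hiff.mpr hpal]
      rw [if_pos ⟨rfl, rfl⟩]
      refine ⟨rfl, rfl, ⟨i, rfl, by omega, hpal, ?_⟩, rfl, hfresh hpal⟩
      intro k hk1 hk2; omega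
    · have hne : apsWhile (c :: t) (i:Int) (((i + 1 - 2) / 2 : Nat) : Int) (((i + 1 + 1) / 2 : Nat) : Int)
          ≠ (-1, (i:Int) + 1) := fun hc => hpal (hiff.mp hc)
      rw [if_neg (fun hc => hne (Prod.ext_iff.mpr ⟨hc.1, hc.2⟩))]
      refine ⟨rfl, rfl, ⟨j, rfl, by omega, hjpal, ?_⟩, rfl, (hkeep hpal).symm⟩
      intro k hk1 hk2
      rcases Nat.lt_or_ge k i with hki | hki
      · exact hjmax k hk1 hki
      · have : k = i := by omega
        subst this; exact hpal

-- folding the loop body over the remaining indices preserves the invariant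
theorem fold_inv (s : List Char) (m : Nat) :
    ∀ (j : Nat) (st : Int × Int × Int × PySem.Set Char × PySem.Set String),
      j + m = s.length → 2 ≤ j → LoopInv s j st →
      LoopInv s s.length ((PySem.List.enumerate (s.drop j) (j : Int)).foldl (apsStep s) st) := by
  induction m with
  | zero =>
    intro j st hj h2 hinv
    have : s.drop j = [] := by apply List.drop_eq_nil_of_le; omega
    rw [this, PySem.List.enumerate_nil, List.foldl_nil]
    rwa [show s.length = j by omega]
  | succ p ih =>
    intro j st hj h2 hinv
    have hjl : j < s.length := by omega
    rw [List.drop_eq_getElem_cons hjl, PySem.List.enumerate_cons, List.foldl_cons]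
    have : (j : Int) + 1 = ((j + 1 : Nat) : Int) := by push_cast; ring
    rw [this]
    exact ih (j + 1) _ (by omega) (by omega) (inv_step s j st h2 hjl hinv)

-- A computes the palindromic prefixes, shortest first
theorem portA_eq_palPrefs (string : String) (h : string ≠ "") :
    all_palindromes_start string = palPrefs string.toList string.toList.length := by
  unfold all_palindromes_start
  dsimp only
  cases hs : string.toList with
  | nil =>
    exact absurd (by rwa [← String.toList_eq_nil_iff]) h
  | cons c0 t =>
    have hstr : string = String.ofList (c0 :: t) := by rw [← hs, String.ofList_toList]
    cases t with
    | nil =>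
      rw [if_pos (show ([c0] : List Char).length = 1 from rfl)]
      show PySem.Set.ofList [string] = palPrefs [c0] 1
      rw [show (1:Nat) = 0 + 1 from rfl, palPrefs_succ, palPrefs_zero]
      simp only [List.take_succ_cons, List.take_zero, List.reverse_cons, List.reverse_nil,
        List.nil_append]
      rw [if_pos trivial, hstr]
      rfl
    | cons c1 r =>
      rw [if_neg (by simp)]
      dsimp only
      have hpals2 : PySem.Set.ofList (if c0 = c1 then [String.ofList [c0], String.ofList [c0, c1]]
          else [String.ofList [c0]]) = palPrefs (c0 :: c1 :: r) 2 := by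
        rw [palPrefs_two]
        by_cases hcc : c0 = c1
        · rw [if_pos hcc]
          refine PySem.Set.ofList_eq_self_of_nodup _ ?_
          refine List.nodup_cons.mpr ⟨?_, List.nodup_singleton _⟩
          intro hmem
          rw [List.mem_singleton] at hmem
          have := String.ofList_inj.mp hmem
          simpa using congrArg List.length this
        · rw [if_neg hcc]
          exact PySem.Set.ofList_eq_self_of_nodup _ (List.nodup_singleton _)
      cases r with
      | nil =>
        rw [if_pos (show ([c0, c1] : List Char).length = 2 from rfl)]
        show _ = palPrefs [c0, c1] 2
        rw [← hpals2]
        exact PySem.Set.ofList_ofList _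
      | cons c2 r2 =>
        rw [if_neg (by simp)]
        have hlen3 : 2 + (c2 :: r2).length = (c0 :: c1 :: c2 :: r2).length := by simp; omega
        have hinit : LoopInv (c0 :: c1 :: c2 :: r2) 2
            (0, 1, (if c0 = c1 then (1:Int) else 0),
              PySem.Set.ofList (PySem.List.slice (c0 :: c1 :: c2 :: r2) none (some 2)),
              PySem.Set.ofList (if c0 = c1 then [String.ofList [c0], String.ofList [c0, c1]]
                else [String.ofList [c0]])) := by
          refine ⟨by norm_num, by norm_num, ?_, ?_, ?_⟩
          · by_cases hcc : c0 = c1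
            · refine ⟨1, by rw [if_pos hcc]; simp, by omega, ?_, by intro k h1 h2; omega⟩
              subst hcc
              rfl
            · refine ⟨0, by rw [if_neg hcc]; simp, by omega, rfl, ?_⟩
              intro k h1 h2
              have hk1 : k = 1 := by omega
              subst hk1
              intro hp
              have hp' : [c0, c1] = [c1, c0] := hp
              injection hp' with h1' _
              exact hcc h1' 
          · show _ = PySem.Set.ofList ((c0 :: c1 :: c2 :: r2).take 2)
            rw [show (2:Int) = ((2:Nat) : Int) from rfl, PySem.List.slice_to_natCast]
          · show _ = palPrefs (c0 :: c1 :: c2 :: r2) 2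
            exact hpals2
        have hfold := fold_inv (c0 :: c1 :: c2 :: r2) ((c2 :: r2).length) 2 _ hlen3 le_rfl hinit
        have hdrop : PySem.List.slice (c0 :: c1 :: c2 :: r2) (some 2) none
            = (c0 :: c1 :: c2 :: r2).drop 2 := by
          rw [show (2:Int) = ((2:Nat) : Int) from rfl, PySem.List.slice_from_natCast]
        rw [hdrop]
        exact hfold.2.2.2.2

-- B computes the palindromic prefixes, shortest first
theorem portB_eq_palPrefs (string : String) :
    all_palindromes_start_alt string = palPrefs string.toList string.toList.length := by
  unfold all_palindromes_start_alt
  dsimp only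
  set s := string.toList with hs
  have he : ((s.length : Int) + 1 - 1).toNat = s.length := by omega
  rw [PySem.List.pyRange_one, he, List.filter_map, List.map_map]
  have hslice : ∀ k : Nat, PySem.List.slice s none (some ((1:Int) + (k:Int))) = s.take (k+1) := by
    intro k
    rw [show (1:Int) + (k:Int) = ((k+1 : Nat) : Int) by push_cast; ring,
        PySem.List.slice_to_natCast]
  have hcond : ∀ k ∈ List.range s.length,
      ((fun i => PySem.List.slice? (PySem.List.slice s none (some i)) none none (-1)
          == some (PySem.List.slice s none (some i))) ∘ (fun k : Nat => (1:Int) + (k:Int))) k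
        = decide (s.take (k+1) = (s.take (k+1)).reverse) := by
    intro k _
    simp only [Function.comp_apply, hslice k, PySem.List.slice?_none_none_neg_one]
    by_cases hp : s.take (k+1) = (s.take (k+1)).reverse
    · rw [decide_eq_true hp]
      rw [← hp]
      simp
    · rw [decide_eq_false hp]
      simp only [beq_eq_false_iff_ne, ne_eq, Option.some.injEq]
      intro hc; exact hp hc.symm
  rw [List.filter_congr hcond]
  have hmap : ∀ k ∈ (List.range s.length).filter
      (fun k => decide (s.take (k+1) = (s.take (k+1)).reverse)),
      ((fun i => String.ofList (PySem.List.slice s none (some i))) ∘ (fun k : Nat => (1:Int) + (k:Int))) k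
        = String.ofList (s.take (k+1)) := by
    intro k _
    simp only [Function.comp_apply, hslice k]
  rw [List.map_congr_left hmap]
  exact PySem.Set.ofList_eq_self_of_nodup _ (palPrefs_nodup s s.length le_rfl)

-- ===== VERDICT (by name: the statement is the Claim_ definition above) =====
theorem all_palindromes_start_spec : Claim_equal_all_palindromes_start := by
  intro string _ hpre
  unfold Spec_all_palindromes_start
  rw [portA_eq_palPrefs string hpre, portB_eq_palPrefs string]
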